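-- pv_equiv track=rewrite | github.com/sunm2n/Algorithm | 프로그래머스/2/468377. 힌트 스테이지/힌트 스테이지.py | solution
-- ===== SOURCE A (Python) =====
-- def solution(cost, hint):
--     ans = []
--     hint_count = [0] * (len(cost) + 1) #힌트는 stage랑 동일하게 가기 위해
--
--     def check(stage, current_cost, current_hint):
--         if stage > len(cost):
--             ans.append(current_cost)
--             return
--         else:
--             if current_hint[stage] >= len(cost): #
--                 stage_hint = len(cost) - 1
--             else:
--                 stage_hint = current_hint[stage]
--
--             next_hint = current_hint[:]
--             next_cost = current_cost + cost[stage-1][stage_hint]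
--             check(stage+1, next_cost, next_hint)
--
--             if stage < len(cost): #마지막은 힌트를 살 수 없다.
--                 for i in range(1, len(hint[stage-1])):
--                     next_hint[hint[stage-1][i]] += 1
--                 next_cost += hint[stage-1][0]
--                 check(stage+1, next_cost, next_hint)
--
--     check(1, 0, hint_count)
--     answer = min(ans)
--     return answer
-- ===== SOURCE B (Python) =====
-- def solution(cost, hint):
--     # Iterative bitmask enumeration instead of A's recursive tree search:
--     # each mask over the n-1 non-final stages says at which stages a hint is bought.
--     n = len(cost)
--     k = n - 1 if n > 0 else 0
--     best = None
--     for mask in range(2 ** k):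
--         counts = [0] * (n + 1)
--         total = 0
--         for s in range(1, n + 1):
--             c = counts[s]
--             if c >= n:
--                 c = n - 1
--             total += cost[s - 1][c]
--             if s < n and (mask >> (k - s)) & 1:
--                 total += hint[s - 1][0]
--                 for idx in hint[s - 1][1:]:
--                     counts[idx] += 1
--         if best is None or total < best:
--             best = total
--     return best
-- ===== Notes on version B (the rewrite author's own statement) =====
-- stated objective: alternative
-- what changed: A's recursive branch-and-collect tree search (append every branch total to a list, then take min) is replaced by an explicit iterative enumeration of bitmasks over the n-1 non-final stages, simulating the stages for each mask and tracking the running minimum.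
import Mathlib
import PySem

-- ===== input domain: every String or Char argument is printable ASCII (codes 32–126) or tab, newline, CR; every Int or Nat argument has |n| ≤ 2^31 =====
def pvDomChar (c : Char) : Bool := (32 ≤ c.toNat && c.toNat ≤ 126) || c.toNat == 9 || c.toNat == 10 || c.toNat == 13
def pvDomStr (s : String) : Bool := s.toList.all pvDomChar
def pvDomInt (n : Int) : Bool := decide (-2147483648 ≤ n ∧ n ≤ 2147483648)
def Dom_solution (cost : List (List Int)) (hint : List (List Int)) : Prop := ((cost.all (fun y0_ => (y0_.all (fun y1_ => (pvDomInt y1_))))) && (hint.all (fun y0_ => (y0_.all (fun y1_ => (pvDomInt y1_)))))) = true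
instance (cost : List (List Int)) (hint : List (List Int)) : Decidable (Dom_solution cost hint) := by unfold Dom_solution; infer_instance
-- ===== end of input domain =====

-- B replaces A's recursive tree search (collect every branch total into a list, then min)
-- by an iterative enumeration of bitmasks over the n-1 non-final stages, simulating the
-- stages for each mask while tracking the running minimum (objective: alternative).

-- `xs[v] += 1` on a Python list (wrapping index); where Python raises IndexError
-- (index out of range) this returns xs unchanged — such inputs are excluded by Pre_.
-- Used by both ports: both Pythons contain this same element-increment statement.
def pyIncr (xs : List Int) (v : Int) : List Int :=
  match PySem.List.pyIdx? xs.length v with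
  | some i => xs.modify i (· + 1)
  | none => xs

-- ===== PORT A =====
-- A's inner `check`: returns the list of totals appended to `ans`, in DFS order
-- (no-buy branch first).  `hint[stage-1][0]` on an empty row and out-of-range
-- `cost[stage-1][stage_hint]` raise IndexError in Python; the port reads a default
-- there — exactly those inputs are excluded by Pre_.
def checkA (cost hint : List (List Int)) (stage : Nat) (cur : Int) (hints : List Int) : List Int :=
  if _h : stage > cost.length then [cur]
  else
    let ch := hints.getD stage 0
    let sh : Int := if ch ≥ (cost.length : Int) then (cost.length : Int) - 1 else ch
    let nc := cur + (PySem.List.pyGet? ((PySem.List.pyGet? cost ((stage : Int) - 1)).getD []) sh).getD 0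
    let first := checkA cost hint (stage + 1) nc hints
    if stage < cost.length then
      let hrow := (PySem.List.pyGet? hint ((stage : Int) - 1)).getD []
      let nh := (hrow.drop 1).foldl pyIncr hints
      first ++ checkA cost hint (stage + 1) (nc + hrow.headD 0) nh
    else first
termination_by cost.length + 1 - stage
decreasing_by all_goals omega

def solution (cost : List (List Int)) (hint : List (List Int)) : Int :=
  (PySem.List.min? (checkA cost hint 1 0 (List.replicate (cost.length + 1) 0)) (fun x => x)).getD 0

-- ===== PORT B =====
-- B's per-mask simulation of stages s..n; bit (k - s) of mask = buy a hint at stage s.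
def innerB (cost hint : List (List Int)) (k : Nat) (mask : Nat) (s : Nat) (counts : List Int) (total : Int) : Int :=
  if _h : s > cost.length then total
  else
    let c := counts.getD s 0
    let c2 : Int := if c ≥ (cost.length : Int) then (cost.length : Int) - 1 else c
    let total2 := total + (PySem.List.pyGet? ((PySem.List.pyGet? cost ((s : Int) - 1)).getD []) c2).getD 0
    if s < cost.length ∧ (mask >>> (k - s)) &&& 1 = 1 then
      let hrow := (PySem.List.pyGet? hint ((s : Int) - 1)).getD []
      innerB cost hint k mask (s + 1) ((hrow.drop 1).foldl pyIncr counts) (total2 + hrow.headD 0)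
    else
      innerB cost hint k mask (s + 1) counts total2
termination_by cost.length + 1 - s
decreasing_by all_goals omega

def solution_alt (cost : List (List Int)) (hint : List (List Int)) : Int :=
  let n := cost.length
  let k := if n > 0 then n - 1 else 0
  ((List.range (2 ^ k)).foldl (fun best mask =>
      let t := innerB cost hint k mask 1 (List.replicate (n + 1) 0) 0
      match best with
      | none => some t
      | some b => if t < b then some t else some b) none).getD 0

-- ===== PRECONDITION & SPEC =====
-- the largest hint count stage s can ever reach (all hints bought): hints targeting s
-- (Python index normalization on a list of length n+1) summed over stages 1..s-1
def pvCmax (cost hint : List (List Int)) (s : Nat) : Nat :=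
  ((List.range (s - 1)).map (fun t =>
      ((hint.getD t []).drop 1).countP
        (fun v => PySem.List.pyIdx? (cost.length + 1) v == some s))).sum

-- Exactly the inputs on which the Python A returns (no IndexError): every non-final
-- stage has a nonempty hint row whose targets are valid indices into the length-(n+1)
-- count list, and every stage's cost row is longer than its clamped maximal reachable
-- hint count (the all-buy count; any subset of buys yields a smaller, hence also
-- in-range, clamped index).
def Pre_solution (cost : List (List Int)) (hint : List (List Int)) : Prop :=
  (∀ s, s < cost.length → 1 ≤ s →
      s - 1 < hint.length ∧ hint.getD (s - 1) [] ≠ [] ∧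
      ∀ v ∈ (hint.getD (s - 1) []).drop 1,
        -((cost.length : Int) + 1) ≤ v ∧ v ≤ (cost.length : Int)) ∧
  (∀ s, s < cost.length + 1 → 1 ≤ s →
      min (pvCmax cost hint s) (cost.length - 1) < (cost.getD (s - 1) []).length)

instance (cost : List (List Int)) (hint : List (List Int)) : Decidable (Pre_solution cost hint) := by
  unfold Pre_solution; infer_instance

def pvWitness_solution : List (List Int) × List (List Int) := ([[1, 2], [3, 4]], [[5, 1, 2]])

def Spec_solution (cost : List (List Int)) (hint : List (List Int)) (out : Int) : Prop := out = solution_alt cost hint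
instance (cost : List (List Int)) (hint : List (List Int)) (out : Int) : Decidable (Spec_solution cost hint out) := by unfold Spec_solution; infer_instance

-- ===== CLAIM (what is proved, stated in full; the proofs are below) =====
def Claim_equal_solution : Prop := ∀ (cost : List (List Int)) (hint : List (List Int)), Dom_solution cost hint → Pre_solution cost hint → Spec_solution cost hint (solution cost hint)

-- ===== LEMMAS AND PROOFS =====

theorem bit_add_pow (p q m : Nat) (h : q < p) :
    ((2 ^ p + m) >>> q) &&& 1 = (m >>> q) &&& 1 := by
  rw [Nat.shiftRight_eq_div_pow, Nat.shiftRight_eq_div_pow, Nat.and_one_is_mod, Nat.and_one_is_mod]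
  have h2 : 2 ^ p = 2 ^ (p - q - 1) * 2 * 2 ^ q := by
    rw [mul_comm (2 ^ (p - q - 1)) 2, mul_assoc, ← pow_add, ← pow_succ']
    congr 1; omega
  rw [h2, Nat.add_comm, Nat.add_mul_div_right _ _ (Nat.two_pow_pos q)]
  omega

theorem bit_low (p m : Nat) (h : m < 2 ^ p) : (m >>> p) &&& 1 = 0 := by
  rw [Nat.shiftRight_eq_div_pow, Nat.div_eq_of_lt h]; rfl

theorem bit_high (p m : Nat) (h : m < 2 ^ p) : ((2 ^ p + m) >>> p) &&& 1 = 1 := by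
  rw [Nat.shiftRight_eq_div_pow, Nat.add_comm,
    Nat.add_div_right _ (Nat.two_pow_pos p), Nat.div_eq_of_lt h]; rfl

-- shifting B's running total out of the simulation
theorem innerB_shift (cost hint : List (List Int)) (k mask : Nat) :
    ∀ fuel s (counts : List Int) (tot : Int), cost.length + 1 - s ≤ fuel →
      innerB cost hint k mask s counts tot = tot + innerB cost hint k mask s counts 0 := by
  intro fuel
  induction fuel with
  | zero =>
    intro s counts tot hf
    rw [innerB, innerB]
    have : s > cost.length := by omega
    simp [this]
  | succ fuel ih =>
    intro s counts tot hf
    by_cases hs : s > cost.length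
    · rw [innerB, innerB]; simp [hs]
    · rw [innerB, innerB]
      simp only [hs, dite_false]
      split_ifs with h1 h2 <;>
      · rw [ih _ _ _ (by omega)]
        conv_rhs => rw [ih _ _ _ (by omega)]
        ring_nf

-- B's simulation from stage s reads only mask bits at positions k - t, s ≤ t < n:
-- a higher bit is irrelevant
theorem innerB_mask_high (cost hint : List (List Int)) (k p : Nat) :
    ∀ fuel s (counts : List Int) (tot : Int) (m : Nat), cost.length + 1 - s ≤ fuel →
      (∀ t, s ≤ t → t < cost.length → k - t < p) →
      innerB cost hint k (2 ^ p + m) s counts tot = innerB cost hint k m s counts tot := by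
  intro fuel
  induction fuel with
  | zero =>
    intro s counts tot m hf hp
    rw [innerB, innerB]
    have : s > cost.length := by omega
    simp [this]
  | succ fuel ih =>
    intro s counts tot m hf hp
    by_cases hs : s > cost.length
    · rw [innerB, innerB]; simp [hs]
    · rw [innerB, innerB]
      simp only [hs, dite_false]
      by_cases hsl : s < cost.length
      · rw [bit_add_pow p (k - s) m (hp s le_rfl hsl)]
        split_ifs with h1 <;>
        · exact ih (s + 1) _ _ _ (by omega) (fun t ht1 ht2 => hp t (by omega) ht2)
      · simp only [hsl, false_and, if_false]
        exact ih (s + 1) _ _ _ (by omega) (fun t ht1 ht2 => hp t (by omega) ht2)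

-- main correspondence: A's DFS list of branch totals is exactly B's per-mask totals,
-- masks in increasing order (the stage-s decision is the most significant bit)
theorem checkA_eq (cost hint : List (List Int)) :
    ∀ fuel s (cur : Int) (counts : List Int), cost.length + 1 - s ≤ fuel →
      checkA cost hint s cur counts =
        (List.range (2 ^ (cost.length - s))).map
          (fun m => cur + innerB cost hint (cost.length - 1) m s counts 0) := by
  intro fuel
  induction fuel with
  | zero =>
    intro s cur counts hf
    have hs : s > cost.length := by omega
    rw [checkA]
    have h0 : cost.length - s = 0 := by omega
    rw [h0]
    simp only [hs, dite_true, pow_zero, List.range_one, List.map_cons, List.map_nil]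
    rw [innerB]
    simp [hs]
  | succ fuel ih =>
    intro s cur counts hf
    by_cases hs : s > cost.length
    · rw [checkA]
      have h0 : cost.length - s = 0 := by omega
      rw [h0]
      simp only [hs, dite_true, pow_zero, List.range_one, List.map_cons, List.map_nil]
      rw [innerB]
      simp [hs]
    · rw [checkA]
      simp only [hs, dite_false]
      by_cases hsl : s < cost.length
      · -- a stage with a buy decision: split the masks into the two halves
        have hp : cost.length - s = (cost.length - (s + 1)) + 1 := by omega
        simp only [hsl, if_true]
        rw [ih (s + 1) _ _ (by omega), ih (s + 1) _ _ (by omega)]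
        rw [hp, pow_succ, mul_two (2 ^ (cost.length - (s + 1))), List.range_add,
          List.map_append, List.map_map]
        congr 1
        · -- first half: stage-s bit is 0, no buy
          apply List.map_congr_left
          intro m hm
          rw [List.mem_range] at hm
          conv_rhs => rw [innerB]
          simp only [hs, dite_false]
          have hk : cost.length - 1 - s = cost.length - (s + 1) := by omega
          rw [hk, bit_low _ _ hm]
          simp only [hsl, true_and]
          norm_num
          conv_rhs => rw [innerB_shift cost hint _ _ (cost.length + 1) (s + 1) _ _ (by omega)]
          ring_nf
        · -- second half: stage-s bit is 1, buy
          apply List.map_congr_left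
          intro m hm
          rw [List.mem_range] at hm
          simp only [Function.comp]
          conv_rhs => rw [innerB]
          simp only [hs, dite_false]
          have hk : cost.length - 1 - s = cost.length - (s + 1) := by omega
          rw [hk, bit_high _ _ hm]
          simp only [hsl, true_and, if_true]
          conv_rhs =>
            rw [innerB_mask_high cost hint _ _ (cost.length + 1) (s + 1) _ _ _ (by omega)
              (fun t ht1 ht2 => by omega)]
            rw [innerB_shift cost hint _ _ (cost.length + 1) (s + 1) _ _ (by omega)]
          ring_nf
      · -- the final stage: no buy decision
        simp only [hsl, if_false]
        rw [ih (s + 1) _ _ (by omega)]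
        have h1 : cost.length - (s + 1) = 0 := by omega
        have h2 : cost.length - s = 0 := by omega
        rw [h1, h2]
        simp only [pow_zero, List.range_one, List.map_cons, List.map_nil]
        conv_rhs => rw [innerB]
        simp only [hs, dite_false, hsl, false_and, if_false]
        conv_rhs => rw [innerB_shift cost hint _ _ (cost.length + 1) (s + 1) _ _ (by omega)]
        ring_nf

-- ===== VERDICT (by name: the statement is the Claim_ definition above) =====
theorem solution_spec : Claim_equal_solution := by
  intro cost hint _ _
  unfold Spec_solution solution solution_alt
  rw [checkA_eq cost hint (cost.length + 1) 1 0 (List.replicate (cost.length + 1) 0) (by omega)]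
  have hk : (if cost.length > 0 then cost.length - 1 else 0) = cost.length - 1 := by
    split_ifs <;> omega
  simp only [hk, PySem.List.min?, List.foldl_map, zero_add]
  congr 2
  funext a m
  cases a <;> rfl
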